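-- pv_equiv track=rewrite | github.com/OdeteRib/Zumbis | dev_google.py | valor_numerico
-- ===== SOURCE A (Python) =====
-- def valor_numerico(p):
--     v = 'jgptzmqskbclrhdfnvwx'
--     vn = 0
--     i = 0
--     for c in p:
--         vn += v.index(c) * (20 ** i)
--         i += 1
--     return vn
-- ===== SOURCE B (Python) =====
-- def valor_numerico(p):
--     v = 'jgptzmqskbclrhdfnvwx'
--     vn = 0
--     for c in reversed(p):
--         vn = vn * 20 + v.index(c)
--     return vn
-- ===== Notes on version B (the rewrite author's own statement) =====
-- stated objective: faster
-- what changed: Replaces the positional-weight sum that recomputes 20**i at each step with Horner's method over the reversed string, keeping a single accumulator and no exponentiation.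
import Mathlib
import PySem

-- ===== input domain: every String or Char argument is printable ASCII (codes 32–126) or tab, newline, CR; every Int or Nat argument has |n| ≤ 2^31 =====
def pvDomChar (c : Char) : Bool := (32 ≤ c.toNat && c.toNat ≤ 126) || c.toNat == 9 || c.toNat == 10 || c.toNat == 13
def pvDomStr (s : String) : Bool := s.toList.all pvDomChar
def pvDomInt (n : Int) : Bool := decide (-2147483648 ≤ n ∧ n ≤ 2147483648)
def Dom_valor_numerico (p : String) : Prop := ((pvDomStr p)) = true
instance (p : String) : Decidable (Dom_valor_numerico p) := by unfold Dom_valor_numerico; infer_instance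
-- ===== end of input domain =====

-- B replaces the positional-weight sum with 20**i by Horner's method over the reversed string (idiomatic; same return value).

-- ===== PORT A =====
-- the digit alphabet, shared verbatim by both ports
def pvAlphabet : List Char := "jgptzmqskbclrhdfnvwx".toList

-- v.index(c): on Pre_ every character is present, so the .getD 0 default is never used
def pvIdx (c : Char) : Int := (PySem.List.index? pvAlphabet c).getD 0

def valor_numerico (p : String) : Int :=
  (p.toList.foldl (fun (st : Int × Int) c =>
    (st.1 + pvIdx c * (20 ^ st.2.toNat), st.2 + 1)) (0, 0)).1

-- ===== PORT B =====
def valor_numerico_alt (p : String) : Int :=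
  p.toList.reverse.foldl (fun vn c => vn * 20 + pvIdx c) 0

-- ===== PRECONDITION & SPEC =====
-- A raises ValueError (v.index) on any character outside the alphabet; B raises there too.
def Pre_valor_numerico (p : String) : Prop := (p.toList.all (pvAlphabet.contains ·)) = true
instance (p : String) : Decidable (Pre_valor_numerico p) := by unfold Pre_valor_numerico; infer_instance
def pvWitness_valor_numerico : String := "zgpt"

def Spec_valor_numerico (p : String) (out : Int) : Prop := out = valor_numerico_alt p
instance (p : String) (out : Int) : Decidable (Spec_valor_numerico p out) := by unfold Spec_valor_numerico; infer_instance

-- ===== CLAIM (what is proved, stated in full; the proofs are below) =====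
def Claim_equal_valor_numerico : Prop := ∀ (p : String), Dom_valor_numerico p → Pre_valor_numerico p → Spec_valor_numerico p (valor_numerico p)

-- ===== LEMMAS AND PROOFS =====

-- B as a foldr (Horner, most-significant first = foldl over the reverse)
theorem alt_foldr (l : List Char) :
    l.reverse.foldl (fun vn c => vn * 20 + pvIdx c) 0
      = l.foldr (fun c vn => vn * 20 + pvIdx c) 0 := by
  rw [List.foldl_reverse]

theorem fold_agree (l : List Char) (vn i : Int) (hi : 0 ≤ i) :
    (l.foldl (fun (st : Int × Int) c =>
      (st.1 + pvIdx c * (20 ^ st.2.toNat), st.2 + 1)) (vn, i)).1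
      = vn + (20 ^ i.toNat) * l.foldr (fun c vn => vn * 20 + pvIdx c) 0 := by
  induction l generalizing vn i with
  | nil => simp
  | cons c l ih =>
    simp only [List.foldl_cons, List.foldr_cons]
    rw [ih (vn + pvIdx c * (20 ^ i.toNat)) (i + 1) (by omega)]
    have : (i + 1).toNat = i.toNat + 1 := by omega
    rw [this, pow_succ]
    ring

-- ===== VERDICT (by name: the statement is the Claim_ definition above) =====
theorem valor_numerico_spec : Claim_equal_valor_numerico := by
  intro p _ _
  unfold Spec_valor_numerico valor_numerico valor_numerico_alt
  rw [alt_foldr, fold_agree _ _ _ le_rfl]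
  simp
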